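-- pv_equiv track=rewrite | github.com/jackbergus/samaplus | sama_lambda.py | rec_noneReplace
-- ===== SOURCE A (Python) =====
-- def rec_noneReplace(ls, i, buildUp, acc):
--     if (i == len(ls)):
--         if (len(buildUp) > 0):
--             acc.append(buildUp)
--         return acc
--     else:
--         if ls[i] is None:
--             if (len(buildUp) > 0):
--                 acc.append(buildUp)
--             return rec_noneReplace(ls, i + 1, [], acc)
--         else:
--             buildUp.append(ls[i])
--             return rec_noneReplace(ls, i + 1, buildUp, acc)
-- ===== SOURCE B (Python) =====
-- def rec_noneReplace(ls, i, buildUp, acc):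
--     for j in range(i, len(ls)):
--         x = ls[j]
--         if x is None:
--             if buildUp:
--                 acc.append(buildUp)
--                 buildUp = []
--         else:
--             buildUp.append(x)
--     if buildUp:
--         acc.append(buildUp)
--     return acc
-- ===== Notes on version B (the rewrite author's own statement) =====
-- stated objective: idiomatic
-- what changed: Replaces A's tail recursion (one call per element, rebuilding the argument tuple each step) by a single iterative for-loop over range(i, len(ls)) with an explicit final flush.
import Mathlib
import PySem

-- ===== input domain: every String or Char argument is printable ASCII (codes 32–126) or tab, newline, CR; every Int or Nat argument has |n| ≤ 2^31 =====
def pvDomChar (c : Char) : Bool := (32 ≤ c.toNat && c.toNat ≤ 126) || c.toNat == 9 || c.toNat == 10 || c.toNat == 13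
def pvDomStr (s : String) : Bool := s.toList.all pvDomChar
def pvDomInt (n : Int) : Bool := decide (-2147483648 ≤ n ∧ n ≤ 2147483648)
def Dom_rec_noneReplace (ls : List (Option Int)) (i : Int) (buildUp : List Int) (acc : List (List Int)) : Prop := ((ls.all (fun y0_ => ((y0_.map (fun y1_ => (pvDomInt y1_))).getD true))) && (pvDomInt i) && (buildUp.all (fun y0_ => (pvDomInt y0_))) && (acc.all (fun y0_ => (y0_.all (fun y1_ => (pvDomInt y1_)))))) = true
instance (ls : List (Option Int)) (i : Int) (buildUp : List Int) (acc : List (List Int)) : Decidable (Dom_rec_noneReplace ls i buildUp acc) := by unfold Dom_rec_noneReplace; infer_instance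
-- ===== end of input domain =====

-- B replaces A's recursion by a single iterative loop over range(i, len(ls)) with a final
-- flush (objective: idiomatic/simpler). Equivalence is about the RETURN value only: both
-- versions mutate buildUp/acc in place in Python, in the same way.

-- ===== PORT A =====
-- literal transliteration of A's recursion; recursion on index i, measure (len - i).toNat.
-- pyGet? = none is Python's IndexError (excluded by Pre_); the port returns acc there.
def rec_noneReplace (ls : List (Option Int)) (i : Int) (buildUp : List Int) (acc : List (List Int)) : List (List Int) :=
  if i = (PySem.List.len ls) then
    if buildUp.length > 0 then acc ++ [buildUp] else acc
  else
    match h : PySem.List.pyGet? ls i with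
    | none => acc
    | some none =>
        rec_noneReplace ls (i + 1) [] (if buildUp.length > 0 then acc ++ [buildUp] else acc)
    | some (some v) =>
        rec_noneReplace ls (i + 1) (buildUp ++ [v]) acc
termination_by ((ls.length : Int) - i).toNat
decreasing_by
  all_goals
    have hin : PySem.Raise.InRange ls.length i := by
      by_contra hc
      rw [← PySem.List.pyGet?_eq_none_iff (xs := ls)] at hc
      simp [hc] at h
    obtain ⟨_, h2⟩ := hin
    omega

-- ===== PORT B =====
-- one loop step of B's for-loop over j ∈ range(i, len(ls)); state = (buildUp, acc)
def pvStep (ls : List (Option Int)) (st : List Int × List (List Int)) (j : Int) :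
    List Int × List (List Int) :=
  match PySem.List.pyGet? ls j with
  | none => st                      -- IndexError in Python B; unreachable under Pre_
  | some none => if st.1 ≠ [] then ([], st.2 ++ [st.1]) else st
  | some (some v) => (st.1 ++ [v], st.2)

def rec_noneReplace_alt (ls : List (Option Int)) (i : Int) (buildUp : List Int) (acc : List (List Int)) : List (List Int) :=
  let st := (PySem.List.pyRange i (PySem.List.len ls) 1).foldl (pvStep ls) (buildUp, acc)
  if st.1 ≠ [] then st.2 ++ [st.1] else st.2

-- ===== PRECONDITION & SPEC =====
-- Pre_ excludes exactly i > len(ls) and i < -len(ls), where Python A raises IndexError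
-- (negative i with -len ≤ i wraps around in both A and B and is kept inside the claim).
def Pre_rec_noneReplace (ls : List (Option Int)) (i : Int) (buildUp : List Int) (acc : List (List Int)) : Prop :=
  -(ls.length : Int) ≤ i ∧ i ≤ (ls.length : Int)
instance (ls : List (Option Int)) (i : Int) (buildUp : List Int) (acc : List (List Int)) : Decidable (Pre_rec_noneReplace ls i buildUp acc) := by unfold Pre_rec_noneReplace; infer_instance

def pvWitness_rec_noneReplace : List (Option Int) × Int × List Int × List (List Int) :=
  ([some 1, none, some 2], 0, [], [])

def Spec_rec_noneReplace (ls : List (Option Int)) (i : Int) (buildUp : List Int) (acc : List (List Int)) (out : List (List Int)) : Prop := out = rec_noneReplace_alt ls i buildUp acc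
instance (ls : List (Option Int)) (i : Int) (buildUp : List Int) (acc : List (List Int)) (out : List (List Int)) : Decidable (Spec_rec_noneReplace ls i buildUp acc out) := by unfold Spec_rec_noneReplace; infer_instance

-- ===== CLAIM (what is proved, stated in full; the proofs are below) =====
def Claim_equal_rec_noneReplace : Prop := ∀ (ls : List (Option Int)) (i : Int) (buildUp : List Int) (acc : List (List Int)), Dom_rec_noneReplace ls i buildUp acc → Pre_rec_noneReplace ls i buildUp acc → Spec_rec_noneReplace ls i buildUp acc (rec_noneReplace ls i buildUp acc)


-- ===== LEMMAS AND PROOFS =====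

-- the main induction: A's recursion equals B's fold, for any in-range starting index
theorem pv_main (ls : List (Option Int)) : ∀ (n : Nat) (i : Int) (b : List Int) (a : List (List Int)),
    ((ls.length : Int) - i).toNat ≤ n → -(ls.length : Int) ≤ i → i ≤ (ls.length : Int) →
    rec_noneReplace ls i b a = rec_noneReplace_alt ls i b a := by
  intro n
  induction n with
  | zero =>
    intro i b a hn h1 h2
    have hi : i = (ls.length : Int) := by omega
    rw [rec_noneReplace, rec_noneReplace_alt]
    simp [hi, PySem.List.pyRange_one_eq_nil (le_refl ((ls.length : Int)))]
    by_cases hb : b = [] <;> simp [hb]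
  | succ n ih =>
    intro i b a hn h1 h2
    by_cases hi : i = (ls.length : Int)
    · rw [rec_noneReplace, rec_noneReplace_alt]
      simp [hi, PySem.List.pyRange_one_eq_nil (le_refl ((ls.length : Int)))]
      by_cases hb : b = [] <;> simp [hb]
    · have hlt : i < (ls.length : Int) := lt_of_le_of_ne h2 hi
      have hsome : ∃ x, PySem.List.pyGet? ls i = some x := by
        cases hx : PySem.List.pyGet? ls i with
        | none =>
          rw [PySem.List.pyGet?_eq_none_iff] at hx
          exact absurd ⟨h1, hlt⟩ hx
        | some x => exact ⟨x, rfl⟩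
      obtain ⟨x, hx⟩ := hsome
      have hrange : PySem.List.pyRange i (PySem.List.len ls) 1
          = i :: PySem.List.pyRange (i + 1) (PySem.List.len ls) 1 := by
        simpa using PySem.List.pyRange_one_cons (a := i) (b := (ls.length : Int)) hlt
      have halt : ∀ (b' : List Int) (a' : List (List Int)),
          rec_noneReplace_alt ls i b' a' = rec_noneReplace_alt ls (i + 1)
            (pvStep ls (b', a') i).1 (pvStep ls (b', a') i).2 := by
        intro b' a'
        rw [rec_noneReplace_alt, rec_noneReplace_alt, hrange]
        rfl
      rw [rec_noneReplace]
      simp only [PySem.List.len_eq, if_neg hi]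
      have hbound : ((ls.length : Int) - (i + 1)).toNat ≤ n := by omega
      cases x with
      | none =>
        rw [hx, halt b a]
        simp only [pvStep, hx]
        have heq : (if b.length > 0 then a ++ [b] else a) = (if b ≠ [] then a ++ [b] else a) := by
          by_cases hb : b = [] <;> simp [hb]
        rw [heq]
        by_cases hb : b = []
        · simpa [hb] using ih (i + 1) [] a hbound (by omega) (by omega)
        · simp only [if_pos hb]
          exact ih (i + 1) [] (a ++ [b]) hbound (by omega) (by omega)
      | some v =>
        rw [hx, halt b a]
        simp only [pvStep, hx]
        exact ih (i + 1) (b ++ [v]) a hbound (by omega) (by omega)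

-- ===== VERDICT (by name: the statement is the Claim_ definition above) =====
theorem rec_noneReplace_spec : Claim_equal_rec_noneReplace := by
  intro ls i b a _ hpre
  unfold Spec_rec_noneReplace
  exact pv_main ls ((ls.length : Int) - i).toNat i b a le_rfl hpre.1 hpre.2
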